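-- pv_equiv track=rewrite | github.com/AlexisAndradeDev/CommandsGPT | commands_gpt/commands_gpt/fine_tuning.py | get_commands_combinations
-- ===== SOURCE A (Python) =====
-- from itertools import combinations, chain
--
-- def get_commands_combinations(commands: list[str],
--         max_commands_per_combination: int = 4) -> list[tuple[str]]:
--     max_commands_per_combination = min(len(commands), max_commands_per_combination)
--     combinations_ranges = [
--         combinations(commands, i)
--         for i in range(2, max_commands_per_combination + 1)
--     ]
--     combined_combinations = list(chain.from_iterable(combinations_ranges))
--     return combined_combinations
-- ===== SOURCE B (Python) =====
-- def _combos(items, size):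
--     """All size-length combinations of items, lexicographic by position."""
--     if size == 0:
--         return [()]
--     res = []
--     for j in range(len(items) - size + 1):
--         for rest in _combos(items[j + 1:], size - 1):
--             res.append((items[j],) + rest)
--     return res
--
--
-- def get_commands_combinations(commands: list[str],
--         max_commands_per_combination: int = 4) -> list[tuple[str]]:
--     m = min(len(commands), max_commands_per_combination)
--     out = []
--     for i in range(2, m + 1):
--         out.extend(_combos(commands, i))
--     return out
-- ===== Notes on version B (the rewrite author's own statement) =====
-- stated objective: alternative
-- what changed: Replaces the itertools.combinations + chain.from_iterable pipeline with a hand-written recursive enumerator that, at each position, picks one element by start index and recurses on the remaining suffix, accumulating the sizes 2..min(len,max) with a fold.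
import Mathlib
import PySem

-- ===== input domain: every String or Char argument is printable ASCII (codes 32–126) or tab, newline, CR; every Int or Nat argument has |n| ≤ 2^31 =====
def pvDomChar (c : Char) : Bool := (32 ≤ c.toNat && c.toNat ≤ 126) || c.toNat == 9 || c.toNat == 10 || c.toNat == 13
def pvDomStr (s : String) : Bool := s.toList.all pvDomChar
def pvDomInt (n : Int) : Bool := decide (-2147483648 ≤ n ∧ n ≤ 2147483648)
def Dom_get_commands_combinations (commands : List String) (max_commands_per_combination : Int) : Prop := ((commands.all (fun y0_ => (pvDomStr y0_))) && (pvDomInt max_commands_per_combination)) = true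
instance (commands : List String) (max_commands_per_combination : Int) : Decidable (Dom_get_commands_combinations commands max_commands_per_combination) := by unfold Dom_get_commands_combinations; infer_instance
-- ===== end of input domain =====

-- B replaces the itertools.combinations/chain pipeline by a hand-rolled recursive
-- choose-at-each-start-index enumerator folded over the same size range (objective: alternative).

-- ===== PORT A =====
-- itertools.combinations(pool, r): lexicographic-by-index combinations; exact port of
-- the library call's documented semantics (choose the head or skip it).
def pyCombinations : List String → Nat → List (List String)
  | _, 0 => [[]]
  | [], _ + 1 => []
  | x :: xs, r + 1 => ((pyCombinations xs r).map (fun t => x :: t)) ++ pyCombinations xs (r + 1)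

def get_commands_combinations (commands : List String) (max_commands_per_combination : Int) : List (List String) :=
  let m := min (commands.length : Int) max_commands_per_combination
  -- [combinations(commands, i) for i in range(2, m + 1)], then chain.from_iterable
  (((PySem.List.pyRange 2 (m + 1) 1).map (fun i => pyCombinations commands i.toNat))).flatten

-- ===== PORT B =====
-- _combos(items, size): pick items[j] at each admissible start index j, recurse on the suffix.
def combosB (items : List String) (size : Nat) : List (List String) :=
  match size with
  | 0 => [[]]
  | s + 1 =>
    (PySem.List.pyRange 0 ((items.length : Int) - (s + 1) + 1) 1).foldl
      (fun res j =>
        res ++ (combosB (items.drop (j + 1).toNat) s).map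
          (fun rest => PySem.List.pyGetD items j "" :: rest)) []

def get_commands_combinations_alt (commands : List String) (max_commands_per_combination : Int) : List (List String) :=
  let m := min (commands.length : Int) max_commands_per_combination
  (PySem.List.pyRange 2 (m + 1) 1).foldl (fun out i => out ++ combosB commands i.toNat) []

-- ===== PRECONDITION & SPEC =====
def Spec_get_commands_combinations (commands : List String) (max_commands_per_combination : Int) (out : List (List String)) : Prop := out = get_commands_combinations_alt commands max_commands_per_combination
instance (commands : List String) (max_commands_per_combination : Int) (out : List (List String)) : Decidable (Spec_get_commands_combinations commands max_commands_per_combination out) := by unfold Spec_get_commands_combinations; infer_instance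

-- ===== CLAIM (what is proved, stated in full; the proofs are below) =====
def Claim_equal_get_commands_combinations : Prop := ∀ (commands : List String) (max_commands_per_combination : Int), Dom_get_commands_combinations commands max_commands_per_combination → Spec_get_commands_combinations commands max_commands_per_combination (get_commands_combinations commands max_commands_per_combination)

-- ===== LEMMAS AND PROOFS =====

theorem pyCombinations_eq_nil : ∀ (items : List String) (r : Nat), items.length < r →
    pyCombinations items r = [] := by
  intro items
  induction items with
  | nil => intro r h; cases r with
    | zero => omega
    | succ s => simp [pyCombinations]
  | cons x xs ih =>
    intro r h
    cases r with
    | zero => omega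
    | succ s =>
      simp only [pyCombinations]
      rw [ih s (by simpa using h), ih (s+1) (by simp at h; omega)]
      simp

theorem combosB_eq : ∀ (size : Nat) (items : List String),
    pyCombinations items size = combosB items size := by
  intro size
  induction size with
  | zero => intro items; cases items <;> simp [pyCombinations, combosB]
  | succ s ih =>
    intro items
    induction items with
    | nil =>
      simp only [combosB, List.length_nil]
      rw [PySem.List.pyRange_one_eq_nil (by omega)]
      cases s <;> simp [pyCombinations]
    | cons x xs ih2 =>
      simp only [combosB]
      rw [PySem.List.foldl_append_eq_flatMap, List.nil_append]
      by_cases h : s ≤ xs.length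
      · have hpos : (0 : Int) < ((x :: xs).length : Int) - (s + 1) + 1 := by
          simp; omega
        rw [PySem.List.pyRange_one_cons hpos]
        simp only [List.flatMap_cons]
        have h0 : ((0 : Int) + 1).toNat = 1 := by decide
        have hget0 : PySem.List.pyGetD (x :: xs) 0 "" = x := PySem.List.pyGetD_zero_cons x xs ""
        rw [h0, hget0]
        simp only [List.drop_one, List.tail_cons]
        have htail : PySem.List.pyRange 1 (((x :: xs).length : Int) - (s + 1) + 1) 1
            = (List.range (((xs.length : Int) - s).toNat)).map (fun k : Nat => (1 : Int) + k) := by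
          rw [PySem.List.pyRange_one]
          congr 2
          simp only [List.length_cons]
          omega
        have hrange : PySem.List.pyRange 0 ((xs.length : Int) - (s + 1) + 1) 1
            = (List.range (((xs.length : Int) - s).toNat)).map (fun k : Nat => (0 : Int) + k) := by
          rw [PySem.List.pyRange_one]
          congr 2
          omega
        have hflat :
            (PySem.List.pyRange 1 (((x :: xs).length : Int) - (s + 1) + 1) 1).flatMap
              (fun j => (combosB ((x :: xs).drop (j + 1).toNat) s).map
                (fun rest => PySem.List.pyGetD (x :: xs) j "" :: rest))
            = (PySem.List.pyRange 0 ((xs.length : Int) - (s + 1) + 1) 1).flatMap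
              (fun j => (combosB (xs.drop (j + 1).toNat) s).map
                (fun rest => PySem.List.pyGetD xs j "" :: rest)) := by
          rw [htail, hrange, List.flatMap_map, List.flatMap_map]
          congr 1
          funext k
          have e1 : ((1 : Int) + k + 1).toNat = k + 2 := by omega
          have e2 : ((0 : Int) + k + 1).toNat = k + 1 := by omega
          have e3 : (1 : Int) + k = ((k + 1 : Nat) : Int) := by omega
          have e4 : (0 : Int) + k = ((k : Nat) : Int) := by omega
          rw [e1, e2, e3, e4, PySem.List.pyGetD_natCast, PySem.List.pyGetD_natCast]
          simp [List.getD]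
        simp only [zero_add]
        rw [hflat]
        have hB : combosB xs (s + 1)
            = (PySem.List.pyRange 0 ((xs.length : Int) - (s + 1) + 1) 1).flatMap
              (fun j => (combosB (xs.drop (j + 1).toNat) s).map
                (fun rest => PySem.List.pyGetD xs j "" :: rest)) := by
          simp only [combosB]
          rw [PySem.List.foldl_append_eq_flatMap, List.nil_append]
        rw [← hB]
        simp only [pyCombinations]
        rw [ih xs, ih2]
      · have hnil : PySem.List.pyRange 0 (((x :: xs).length : Int) - (s + 1) + 1) 1 = [] := by
          apply PySem.List.pyRange_one_eq_nil
          simp; omega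
        rw [hnil, List.flatMap_nil]
        exact pyCombinations_eq_nil _ _ (by simp; omega)

theorem get_commands_combinations_spec : Claim_equal_get_commands_combinations := by
  intro commands maxc _
  unfold Spec_get_commands_combinations
  simp only [get_commands_combinations, get_commands_combinations_alt]
  rw [PySem.List.foldl_append_eq_flatMap, List.nil_append]
  rw [List.flatMap_def]
  congr 1
  apply List.map_congr_left
  intro i _
  exact combosB_eq _ _
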